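-- pv_equiv track=rewrite | github.com/miliar/Code_Jam_Webscraper | solutions_python/solutions_year14_round0_nr1/3854.py | solve
-- ===== SOURCE A (Python) =====
-- def solve(b,c,d,e):
--     count = 0
--     if b[d] == c[e]:
--         return 'Bad magician!'
--     else:
--         for i in range(0,4):
--             for j in range(0,4):
--                 if b[d][i] == c[e][j]:
--                     count = count+1
--                     res = b[d][i]
--         if count == 0:
--             return 'Volunteer cheated!'
--         else:
--             if count == 1:
--                 return res
--             else:
--                 return 'Bad magician!'
-- ===== SOURCE B (Python) =====
-- def solve(b, c, d, e):
--     if b[d] == c[e]: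
--         return 'Bad magician!'
--     row_b = b[d][:4]
--     row_c = c[e][:4]
--     cb = {}
--     for v in row_b:
--         cb[v] = cb.get(v, 0) + 1
--     cc = {}
--     for v in row_c:
--         cc[v] = cc.get(v, 0) + 1
--     count = sum(m * cc.get(v, 0) for v, m in cb.items())
--     if count == 0:
--         return 'Volunteer cheated!'
--     if count == 1:
--         for v in cb:
--             if cc.get(v, 0) > 0:
--                 return v
--     return 'Bad magician!'
-- ===== Notes on version B (the rewrite author's own statement) =====
-- stated objective: idiomatic
-- what changed: Replaced the 4x4 index-pair loop with two hash counters over the first four cards and a multiset-intersection sum (count = sum of multiplicity products); the unique common card is read off the counter keys instead of loop-carried state.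
import Mathlib
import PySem

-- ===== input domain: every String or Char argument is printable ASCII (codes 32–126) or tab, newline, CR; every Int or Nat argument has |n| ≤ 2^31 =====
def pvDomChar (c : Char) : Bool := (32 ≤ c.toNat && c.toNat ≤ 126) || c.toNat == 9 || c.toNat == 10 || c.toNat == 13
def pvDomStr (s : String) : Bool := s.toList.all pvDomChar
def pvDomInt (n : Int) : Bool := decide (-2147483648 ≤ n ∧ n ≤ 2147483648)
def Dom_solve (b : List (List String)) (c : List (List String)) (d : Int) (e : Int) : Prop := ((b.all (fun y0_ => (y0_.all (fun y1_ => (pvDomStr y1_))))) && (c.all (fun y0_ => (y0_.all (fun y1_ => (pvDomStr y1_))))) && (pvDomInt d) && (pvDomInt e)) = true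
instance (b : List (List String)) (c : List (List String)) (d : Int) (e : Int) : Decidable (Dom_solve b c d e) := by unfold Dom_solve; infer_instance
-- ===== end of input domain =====

-- B replaces A's 4×4 index loop by two counters and a multiset-intersection sum (objective: idiomatic / alternative; return value only).

-- ===== PORT A =====
def solve (b : List (List String)) (c : List (List String)) (d : Int) (e : Int) : String :=
  if PySem.List.pyGetD b d [] == PySem.List.pyGetD c e [] then "Bad magician!"
  else
    let st : Int × String :=
      (PySem.List.pyRange 0 4 1).foldl (fun s i =>
        (PySem.List.pyRange 0 4 1).foldl (fun s j =>
          if PySem.List.pyGetD (PySem.List.pyGetD b d []) i "" == PySem.List.pyGetD (PySem.List.pyGetD c e []) j "" then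
            (s.1 + 1, PySem.List.pyGetD (PySem.List.pyGetD b d []) i "")
          else s) s) ((0 : Int), "")
    if st.1 == 0 then "Volunteer cheated!"
    else if st.1 == 1 then st.2
    else "Bad magician!"

-- ===== PORT B =====
def solve_alt (b : List (List String)) (c : List (List String)) (d : Int) (e : Int) : String :=
  let bd := PySem.List.pyGetD b d []
  let ce := PySem.List.pyGetD c e []
  if bd == ce then "Bad magician!"
  else
    let rowB := PySem.List.slice bd none (some 4)
    let rowC := PySem.List.slice ce none (some 4)
    let cb := rowB.foldl (fun acc v => acc.insert v (acc.getD v 0 + 1)) (PySem.Dict.empty : PySem.Dict String Int)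
    let cc := rowC.foldl (fun acc v => acc.insert v (acc.getD v 0 + 1)) (PySem.Dict.empty : PySem.Dict String Int)
    let count : Int := (cb.items.map (fun p => p.2 * cc.getD p.1 0)).sum
    if count == 0 then "Volunteer cheated!"
    else if count == 1 then
      match cb.keys.find? (fun v => cc.getD v 0 > 0) with
      | some v => v
      | none => "Bad magician!"
    else "Bad magician!"

-- ===== PRECONDITION & SPEC =====
-- Pre_ excludes exactly the inputs where A raises IndexError: an out-of-range row index,
-- or unequal selected rows one of which has fewer than 4 cards (the i/j loop indexes positions 0..3).
def Pre_solve (b : List (List String)) (c : List (List String)) (d : Int) (e : Int) : Prop :=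
  PySem.Raise.InRange b.length d ∧ PySem.Raise.InRange c.length e ∧
    (PySem.List.pyGetD b d [] = PySem.List.pyGetD c e [] ∨
      (4 ≤ (PySem.List.pyGetD b d []).length ∧ 4 ≤ (PySem.List.pyGetD c e []).length))
instance (b : List (List String)) (c : List (List String)) (d : Int) (e : Int) : Decidable (Pre_solve b c d e) := by unfold Pre_solve; infer_instance
def pvWitness_solve : List (List String) × List (List String) × Int × Int :=
  ([["1", "2", "3", "4"]], [["3", "5", "6", "7"]], 0, 0)

def Spec_solve (b : List (List String)) (c : List (List String)) (d : Int) (e : Int) (out : String) : Prop := out = solve_alt b c d e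
instance (b : List (List String)) (c : List (List String)) (d : Int) (e : Int) (out : String) : Decidable (Spec_solve b c d e out) := by unfold Spec_solve; infer_instance

-- ===== CLAIM (what is proved, stated in full; the proofs are below) =====
def Claim_equal_solve : Prop := ∀ (b : List (List String)) (c : List (List String)) (d : Int) (e : Int), Dom_solve b c d e → Pre_solve b c d e → Spec_solve b c d e (solve b c d e)

-- ===== LEMMAS AND PROOFS =====

-- inner j-loop of A: scanning ys against a fixed x adds ys.count x and records x iff it occurs
theorem pv_inner (ys : List String) (x : String) (s : Int × String) :
    ys.foldl (fun s y => if x == y then (s.1 + 1, x) else s) s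
      = (s.1 + (ys.count x : Int), if ys.count x = 0 then s.2 else x) := by
  induction ys generalizing s with
  | nil => simp
  | cons y t ih =>
    rw [List.foldl_cons]
    by_cases h : x = y
    · subst h
      rw [if_pos (by simp)]
      rw [ih]
      rw [List.count_cons_self]
      refine Prod.ext ?_ ?_
      · push_cast; ring
      · simp
    · have hc : (y == x) = false := by simp [Ne.symm h]
      rw [if_neg (by simp [h])]
      rw [ih, List.count_cons, hc]
      simp

-- a for-loop over range(0,n) indexing ys is a fold over the first n elements of ys
theorem pv_takeFold {α : Type} (ys : List String) (n : Nat) (f : α → String → α) (init : α)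
    (h : n ≤ ys.length) :
    (PySem.List.pyRange 0 (n : Int) 1).foldl (fun s j => f s (PySem.List.pyGetD ys j "")) init
      = (ys.take n).foldl f init := by
  have hlen : (ys.take n).length = n := by simp [h]
  have := PySem.List.foldl_pyRange_zero_pyGetD (ys.take n) "" f init
  have hlen2 : PySem.List.len (ys.take n) = (n : Int) := by
    simp [PySem.List.len, h]
  rw [hlen2] at this
  rw [← this]
  apply PySem.List.foldl_congr_mem
  intro s j hj
  have hj' := (PySem.List.mem_pyRange_one).1 hj
  have h0 : 0 ≤ j := hj'.1
  have h1 : j < (n : Int) := hj'.2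
  have hjn : j.toNat < n := by omega
  have hj2 : j = ((j.toNat : Nat) : Int) := by omega
  rw [hj2, PySem.List.pyGetD_natCast, PySem.List.pyGetD_natCast]
  simp [List.getD, hjn]

-- the outer i-loop after pv_inner: total count and last matching element
theorem pv_outer (rc : List String) (rb : List String) (s : Int × String) :
    rb.foldl (fun s x => (s.1 + (rc.count x : Int), if rc.count x = 0 then s.2 else x)) s
      = (s.1 + ((rb.map fun x => (rc.count x : Int)).sum),
         rb.foldl (fun r x => if rc.count x = 0 then r else x) s.2) := by
  induction rb generalizing s with
  | nil => simp
  | cons x t ih => simp [ih]; ring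

-- counter-intersection sum equals the pairwise match count
theorem pv_counter_sum (rb rc : List String) :
    (((PySem.Dict.counter rb : PySem.Dict String Int).items.map
        (fun p => p.2 * (PySem.Dict.counter rc : PySem.Dict String Int).getD p.1 0)).sum)
      = ((rb.map fun x => (rc.count x : Int)).sum) := by
  rw [PySem.Dict.items_counter]
  rw [List.map_map]
  have hmap : ((fun p : String × Int => p.2 * (PySem.Dict.counter rc : PySem.Dict String Int).getD p.1 0) ∘
      (fun k => (k, (rb.count k : Int)))) = fun k => (rb.count k : Int) * (rc.count k : Int) := by
    funext k
    simp [PySem.Dict.getD_counter]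
  rw [hmap]
  have hnd : (PySem.Set.ofList rb).Nodup := PySem.Set.nodup_ofList rb
  have htf : (PySem.Set.ofList rb).toFinset = rb.toFinset := by
    ext x; simp [PySem.Set.mem_ofList]
  calc ((PySem.Set.ofList rb).map fun k => (rb.count k : Int) * (rc.count k : Int)).sum
      = ∑ k ∈ (PySem.Set.ofList rb).toFinset, (rb.count k : Int) * (rc.count k : Int) := by
        rw [List.sum_toFinset _ hnd]
    _ = ∑ k ∈ rb.toFinset, (rb.count k : Int) * (rc.count k : Int) := by rw [htf]
    _ = ((rb.map fun x => (rc.count x : Int)).sum) := by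
        rw [Finset.sum_list_map_count]
        simp

-- a list whose f-images sum to 1 splits around its unique nonzero element
theorem pv_sum_one_decomp (f : String → Nat) :
    ∀ l : List String, (l.map f).sum = 1 →
      ∃ p x q, l = p ++ x :: q ∧ f x = 1 ∧ (∀ y ∈ p, f y = 0) ∧ (∀ y ∈ q, f y = 0) := by
  intro l
  induction l with
  | nil => intro h; simp at h
  | cons a t ih =>
    intro h
    simp [List.sum_cons] at h
    by_cases ha : f a = 0
    · rw [ha] at h; simp at h
      obtain ⟨p, x, q, hpq, hx, hp, hq⟩ := ih h
      refine ⟨a :: p, x, q, by simp [hpq], hx, ?_, hq⟩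
      intro y hy
      rcases List.mem_cons.1 hy with rfl | hy'
      · exact ha
      · exact hp y hy' 
    · have hfa : f a = 1 := by omega
      have ht : (t.map f).sum = 0 := by omega
      refine ⟨[], a, t, by simp, hfa, by simp, ?_⟩
      intro y hy
      have := List.sum_eq_zero_iff.1 ht (f y) (List.mem_map_of_mem hy)
      exact this

-- first element satisfying p when that element is unique
theorem pv_find_unique {l : List String} {pr : String → Bool} {x : String}
    (hx : x ∈ l) (hpx : pr x = true) (huniq : ∀ y ∈ l, pr y = true → y = x) :
    l.find? pr = some x := by
  induction l with
  | nil => simp at hx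
  | cons a t ih =>
    by_cases hpa : pr a = true
    · have : a = x := huniq a (by simp) hpa
      subst this
      simp [List.find?, hpa]
    · have hax : a ≠ x := fun h => hpa (h ▸ hpx)
      have hxt : x ∈ t := by
        rcases List.mem_cons.1 hx with rfl | h
        · exact absurd rfl hax
        · exact h
      rw [List.find?_cons_of_neg hpa]
      exact ih hxt (fun y hy hp => huniq y (List.mem_cons_of_mem _ hy) hp)



-- A's whole nested loop, as (total match count, last matching card)
theorem pv_Acore (bd ce : List String) (hb : 4 ≤ bd.length) (hc : 4 ≤ ce.length) :
    (PySem.List.pyRange 0 4 1).foldl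
        (fun s i => (PySem.List.pyRange 0 4 1).foldl
          (fun s j => if PySem.List.pyGetD bd i "" == PySem.List.pyGetD ce j "" then
              (s.1 + 1, PySem.List.pyGetD bd i "") else s) s)
        ((0 : Int), "")
      = (((bd.take 4).map fun x => (((ce.take 4).count x : Nat) : Int)).sum,
         (bd.take 4).foldl (fun r x => if (ce.take 4).count x = 0 then r else x) "") := by
  have h4 : (4 : Int) = ((4 : Nat) : Int) := by norm_num
  have hG : (fun (s : Int × String) (x : String) =>
      (PySem.List.pyRange 0 ((4 : Nat) : Int) 1).foldl
        (fun s j => if x == PySem.List.pyGetD ce j "" then (s.1 + 1, x) else s) s)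
      = (fun (s : Int × String) (x : String) =>
          (s.1 + (((ce.take 4).count x : Nat) : Int), if (ce.take 4).count x = 0 then s.2 else x)) := by
    funext s x
    exact Eq.trans
      (pv_takeFold ce 4 (fun s y => if x == y then (s.1 + 1, x) else s) s hc)
      (pv_inner (ce.take 4) x s)
  rw [h4]
  refine Eq.trans (pv_takeFold bd 4 (fun (s : Int × String) (x : String) =>
      (PySem.List.pyRange 0 ((4 : Nat) : Int) 1).foldl
        (fun s j => if x == PySem.List.pyGetD ce j "" then (s.1 + 1, x) else s) s)
      ((0 : Int), "") hb) ?_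
  rw [hG, pv_outer]
  simp

-- with exactly one matching pair, B's first common key is A's last recorded match
theorem pv_res_eq (rb rc : List String)
    (h1 : ((rb.map fun x => ((rc.count x : Nat) : Int)).sum) = 1) :
    (match (PySem.Set.ofList rb).find? (fun v => decide (v ∈ rc)) with
     | some v => v
     | none => "Bad magician!")
      = rb.foldl (fun r x => if rc.count x = 0 then r else x) "" := by
  have hcast : ∀ l : List String, ((l.map fun x => ((rc.count x : Nat) : Int)).sum)
      = (((l.map fun x => rc.count x).sum : Nat) : Int) := by
    intro l
    induction l with
    | nil => simp
    | cons a t ih => simp [ih]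
  have hN : ((rb.map fun x => rc.count x).sum) = 1 := by
    have h1' := h1
    rw [hcast] at h1'
    exact_mod_cast h1'
  obtain ⟨p, x, q, hpq, hx, hp, hq⟩ := pv_sum_one_decomp _ rb hN
  have hpr : ∀ v, (decide (v ∈ rc)) = true ↔ rc.count v ≠ 0 := by
    intro v
    simp only [decide_eq_true_eq]
    rw [← List.count_pos_iff]
    omega
  have hfind : (PySem.Set.ofList rb).find? (fun v => decide (v ∈ rc)) = some x := by
    apply pv_find_unique
    · rw [PySem.Set.mem_ofList]
      rw [hpq]; simp
    · rw [hpr]; omega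
    · intro y hy hpy
      have hyrb : y ∈ rb := (PySem.Set.mem_ofList rb y).1 hy
      have hyc : rc.count y ≠ 0 := (hpr y).1 hpy
      rw [hpq] at hyrb
      rcases List.mem_append.1 hyrb with hyp | hyq
      · exact absurd (hp y hyp) hyc
      · rcases List.mem_cons.1 hyq with rfl | hyq'
        · rfl
        · exact absurd (hq y hyq') hyc
  rw [hfind]
  have hfp : ∀ (l : List String) (r : String), (∀ y ∈ l, rc.count y = 0) →
      l.foldl (fun r x => if rc.count x = 0 then r else x) r = r := by
    intro l
    induction l with
    | nil => intro r _; rfl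
    | cons a t ih =>
      intro r hl
      rw [List.foldl_cons, if_pos (hl a (by simp))]
      exact ih r (fun y hy => hl y (List.mem_cons_of_mem _ hy))
  rw [hpq, List.foldl_append, List.foldl_cons, hfp p "" hp, if_neg (by omega), hfp q x hq]

-- ===== VERDICT (by name: the statement is the Claim_ definition above) =====
theorem solve_spec : Claim_equal_solve := by
  intro b c d e _ hpre
  obtain ⟨hd, he, hrest⟩ := hpre
  unfold Spec_solve solve solve_alt
  by_cases hbc : PySem.List.pyGetD b d [] = PySem.List.pyGetD c e []
  · simp [hbc]
  · have hb4 := (hrest.resolve_left hbc).1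
    have hc4 := (hrest.resolve_left hbc).2
    have hbeq : (PySem.List.pyGetD b d [] == PySem.List.pyGetD c e []) = false := by
      simp [hbc]
    have hsl : ∀ xs : List String, PySem.List.slice xs none (some 4) = xs.take 4 := by
      intro xs
      exact PySem.List.slice_to xs (by norm_num)
    have hcb : ∀ xs : List String,
        xs.foldl (fun acc v => acc.insert v (acc.getD v 0 + 1)) (PySem.Dict.empty : PySem.Dict String Int)
          = PySem.Dict.counter xs := PySem.Dict.foldl_insert_getD_add_one_eq_counter
    simp only [hbeq, Bool.false_eq_true, if_false, hsl, hcb, pv_Acore _ _ hb4 hc4,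
      pv_counter_sum, PySem.Dict.keys_counter]
    set S : Int := (((PySem.List.pyGetD b d []).take 4).map fun x =>
      ((((PySem.List.pyGetD c e []).take 4).count x : Nat) : Int)).sum with hS
    by_cases h0 : S = 0
    · simp [h0]
    · by_cases h1 : S = 1
      · simp only [h1]
        norm_num
        exact (pv_res_eq ((PySem.List.pyGetD b d []).take 4) ((PySem.List.pyGetD c e []).take 4) (hS ▸ h1)).symm
      · simp [h0, h1]
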